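-- pv_equiv track=rewrite | github.com/prithika-sathish/Sales-Lead-Automation | intelligence/high_intent_signals.py | high_intent_score_boost
-- ===== SOURCE A (Python) =====
-- from typing import Any
--
-- def high_intent_score_boost(high_intent_signals: list[dict[str, Any]], derived_signals: list[dict[str, Any]]) -> int:
--     boost = 0
--     categories = {str(sig.get("type") or "") for sig in high_intent_signals}
--     derived_types = {str(sig.get("type") or "") for sig in derived_signals}
--
--     if "urgent_trigger_event" in categories or "high_priority_need" in derived_types:
--         boost += 25
--     if "operational_pain" in categories:
--         boost += 20
--     if "decision_maker_intent" in categories: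
--         boost += 20
--     if "competitor_engagement" in categories:
--         boost += 15
--     if "problem_discovery_signal" in categories:
--         boost += 15
--     if "downstream_growth" in categories:
--         boost += 10
--     return boost
-- ===== SOURCE B (Python) =====
-- # Single consuming pass: each signal's type pops its points out of a mutable
-- # remaining-weights dict (so each category scores at most once), then the
-- # cross-list 25-point rule fires only if the urgent weight is still unclaimed.
-- def high_intent_score_boost(high_intent_signals, derived_signals):
--     remaining = {
--         "urgent_trigger_event": 25,
--         "operational_pain": 20,
--         "decision_maker_intent": 20,
--         "competitor_engagement": 15,
--         "problem_discovery_signal": 15,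
--         "downstream_growth": 10,
--     }
--     boost = 0
--     for sig in high_intent_signals:
--         boost += remaining.pop(str(sig.get("type") or ""), 0)
--     if "urgent_trigger_event" in remaining and any(
--             str(sig.get("type") or "") == "high_priority_need" for sig in derived_signals):
--         boost += 25
--     return boost
-- ===== Notes on version B (the rewrite author's own statement) =====
-- stated objective: alternative
-- what changed: Instead of building two type sets and testing six memberships, B makes one consuming pass popping each signal's type out of a mutable remaining-weights dict (each category scores at most once), and the cross-list 25-point rule fires only if the urgent weight is still unclaimed.
import Mathlib
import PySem

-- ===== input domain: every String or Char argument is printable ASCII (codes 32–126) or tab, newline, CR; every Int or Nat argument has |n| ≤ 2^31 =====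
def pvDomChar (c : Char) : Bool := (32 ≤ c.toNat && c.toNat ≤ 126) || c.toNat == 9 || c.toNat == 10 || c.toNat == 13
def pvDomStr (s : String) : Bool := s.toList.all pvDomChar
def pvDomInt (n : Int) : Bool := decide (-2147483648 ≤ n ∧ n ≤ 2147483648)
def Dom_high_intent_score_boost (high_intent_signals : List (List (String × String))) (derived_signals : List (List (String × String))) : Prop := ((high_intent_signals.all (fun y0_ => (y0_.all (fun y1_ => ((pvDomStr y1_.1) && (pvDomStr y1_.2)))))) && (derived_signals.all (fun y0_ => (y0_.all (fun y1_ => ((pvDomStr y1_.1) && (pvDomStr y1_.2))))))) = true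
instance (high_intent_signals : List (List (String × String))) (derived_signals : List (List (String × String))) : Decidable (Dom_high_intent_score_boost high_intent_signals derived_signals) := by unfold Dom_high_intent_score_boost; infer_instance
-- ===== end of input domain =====

-- B replaces A's two type-sets and six membership branches by one consuming pass that pops each signal's type out of a remaining-weights dict; same cost, different algorithm (return value only; neither program mutates its arguments).


-- ===== PORT A =====
-- A: set of types from each list, then a chain of if-branches each adding its points.
def high_intent_score_boost (high_intent_signals : List (List (String × String))) (derived_signals : List (List (String × String))) : Int :=
  let boost : Int := 0
  let categories : PySem.Set String :=
    PySem.Set.ofList (high_intent_signals.map (fun sig => PySem.Dict.getD (PySem.Dict.mk sig) "type" ""))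
  let derived_types : PySem.Set String :=
    PySem.Set.ofList (derived_signals.map (fun sig => PySem.Dict.getD (PySem.Dict.mk sig) "type" ""))
  let boost := if PySem.Set.contains categories "urgent_trigger_event" || PySem.Set.contains derived_types "high_priority_need" then boost + 25 else boost
  let boost := if PySem.Set.contains categories "operational_pain" then boost + 20 else boost
  let boost := if PySem.Set.contains categories "decision_maker_intent" then boost + 20 else boost
  let boost := if PySem.Set.contains categories "competitor_engagement" then boost + 15 else boost
  let boost := if PySem.Set.contains categories "problem_discovery_signal" then boost + 15 else boost
  let boost := if PySem.Set.contains categories "downstream_growth" then boost + 10 else boost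
  boost

-- ===== PORT B =====
-- B: str(sig.get("type") or "")
def pvTypeOf (sig : List (String × String)) : String :=
  PySem.Dict.getD (PySem.Dict.mk sig) "type" ""

-- B: boost += remaining.pop(t, 0)   (pop the type's weight out of the mutable dict, default 0)
def pvConsume (st : Int × PySem.Dict String Int) (t : String) : Int × PySem.Dict String Int :=
  match st.2.pop? t with
  | some (v, d') => (st.1 + v, d')
  | none => st

-- B: the initial remaining-weights dict
def pvInit : PySem.Dict String Int :=
  PySem.Dict.mk
    [("urgent_trigger_event", 25), ("operational_pain", 20), ("decision_maker_intent", 20),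
     ("competitor_engagement", 15), ("problem_discovery_signal", 15), ("downstream_growth", 10)]

def high_intent_score_boost_alt (high_intent_signals : List (List (String × String))) (derived_signals : List (List (String × String))) : Int :=
  let st := high_intent_signals.foldl (fun st sig => pvConsume st (pvTypeOf sig)) ((0 : Int), pvInit)
  if st.2.contains "urgent_trigger_event"
      && derived_signals.any (fun sig => pvTypeOf sig == "high_priority_need")
  then st.1 + 25 else st.1

-- ===== PRECONDITION & SPEC =====
def Spec_high_intent_score_boost (high_intent_signals : List (List (String × String))) (derived_signals : List (List (String × String))) (out : Int) : Prop := out = high_intent_score_boost_alt high_intent_signals derived_signals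
instance (high_intent_signals : List (List (String × String))) (derived_signals : List (List (String × String))) (out : Int) : Decidable (Spec_high_intent_score_boost high_intent_signals derived_signals out) := by unfold Spec_high_intent_score_boost; infer_instance

-- ===== CLAIM (what is proved, stated in full; the proofs are below) =====
def Claim_equal_high_intent_score_boost : Prop := ∀ (high_intent_signals : List (List (String × String))) (derived_signals : List (List (String × String))), Dom_high_intent_score_boost high_intent_signals derived_signals → Spec_high_intent_score_boost high_intent_signals derived_signals (high_intent_score_boost high_intent_signals derived_signals)

-- ===== LEMMAS AND PROOFS =====

-- splitting a mapped sum along a boolean predicate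
lemma pvSumSplit (l : List (String × Int)) (p : String × Int → Bool) (f : String × Int → Int) :
    (l.map f).sum
      = ((l.filter p).map f).sum + ((l.filter (fun x => !p x)).map f).sum := by
  induction l with
  | nil => simp
  | cons x xs ih =>
    by_cases h : p x = true <;> simp [List.filter_cons, h, ih] <;> ring

-- with unique keys, the entries whose key matches the found key are exactly the found entry
lemma pvFilterKey (l : List (String × Int)) (t : String) (p : String × Int)
    (hf : l.find? (fun q => q.1 == t) = some p) (hnd : (l.map Prod.fst).Nodup) :
    l.filter (fun kv => kv.1 == t) = [p] := by
  induction l with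
  | nil => simp at hf
  | cons x xs ih =>
    simp only [List.map_cons, List.nodup_cons] at hnd
    by_cases hx : x.1 = t
    · have hpx : p = x := by
        rw [List.find?_cons_of_pos (by simp [hx])] at hf
        exact (Option.some_inj.mp hf).symm
      subst hpx
      have hnil : xs.filter (fun kv => kv.1 == t) = [] := by
        rw [List.filter_eq_nil_iff]
        intro kv hkv hbeq
        have hkt : kv.1 = t := by simpa using hbeq
        apply hnd.1
        rw [hx, ← hkt]
        exact List.mem_map_of_mem hkv
      simp [List.filter_cons, hx, hnil]
    · rw [List.find?_cons_of_neg (by simp [hx])] at hf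
      simp [List.filter_cons, hx, ih hf hnd.2]

-- main invariant of B's consuming fold: the boost collects each still-present key's
-- weight on its first occurrence, and the dict keeps exactly the unseen keys
lemma pvConsumeFold (ts : List String) (b : Int) (l : List (String × Int))
    (hnd : (l.map Prod.fst).Nodup) :
    ts.foldl pvConsume (b, PySem.Dict.mk l)
      = (b + (l.map (fun kv => if ts.contains kv.1 then kv.2 else 0)).sum,
         PySem.Dict.mk (l.filter (fun kv => !ts.contains kv.1))) := by
  induction ts generalizing b l with
  | nil => simp
  | cons t rest ih =>
    simp only [List.foldl_cons]
    rcases hf : l.find? (fun q => q.1 == t) with _ | p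
    · have hstep : pvConsume (b, PySem.Dict.mk l) t = (b, PySem.Dict.mk l) := by
        simp [pvConsume, PySem.Dict.pop?, PySem.Dict.get?, hf]
      have hne : ∀ kv ∈ l, ¬ (kv.1 = t) := by
        intro kv hkv h
        have := List.find?_eq_none.mp hf kv hkv
        simp [h] at this
      have hm : (l.map (fun kv => if (t :: rest).contains kv.1 then kv.2 else 0))
          = (l.map (fun kv => if rest.contains kv.1 then kv.2 else 0)) := by
        apply List.map_congr_left
        intro kv hkv
        simp [List.contains_cons, hne kv hkv]
      have hflt : (l.filter (fun kv => !(t :: rest).contains kv.1))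
          = (l.filter (fun kv => !rest.contains kv.1)) := by
        apply List.filter_congr
        intro kv hkv
        simp [List.contains_cons, hne kv hkv]
      rw [hstep, ih b l hnd, hm, hflt]
    · have hpt : p.1 = t := by
        have := List.find?_some hf
        simpa using this
      have hstep : pvConsume (b, PySem.Dict.mk l) t
          = (b + p.2, PySem.Dict.mk (l.filter (fun q => !(q.1 == t)))) := by
        simp [pvConsume, PySem.Dict.pop?, PySem.Dict.get?, PySem.Dict.erase, hf]
      have hnd' : ((l.filter (fun q => !(q.1 == t))).map Prod.fst).Nodup :=
        hnd.sublist (List.Sublist.map Prod.fst List.filter_sublist)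
      have hone : ((l.filter (fun kv => kv.1 == t)).map
          (fun kv => if (t :: rest).contains kv.1 then kv.2 else 0)).sum = p.2 := by
        rw [pvFilterKey l t p hf hnd]
        simp [hpt, List.contains_cons]
      have hrest : ((l.filter (fun q => !(q.1 == t))).map
            (fun kv => if (t :: rest).contains kv.1 then kv.2 else 0))
          = ((l.filter (fun q => !(q.1 == t))).map
            (fun kv => if rest.contains kv.1 then kv.2 else 0)) := by
        apply List.map_congr_left
        intro kv hkv
        have hne : ¬ (kv.1 = t) := by
          have := (List.mem_filter.mp hkv).2
          simpa using this
        simp [List.contains_cons, hne]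
      have key : b + p.2 + ((l.filter (fun q => !(q.1 == t))).map
            (fun kv => if rest.contains kv.1 then kv.2 else 0)).sum
          = b + (l.map (fun kv => if (t :: rest).contains kv.1 then kv.2 else 0)).sum := by
        rw [pvSumSplit l (fun kv => kv.1 == t)
          (fun kv => if (t :: rest).contains kv.1 then kv.2 else 0), hone, ← hrest]
        ring
      have hflt : (l.filter (fun kv => !(t :: rest).contains kv.1))
          = ((l.filter (fun q => !(q.1 == t))).filter (fun kv => !rest.contains kv.1)) := by
        rw [List.filter_filter]
        apply List.filter_congr
        intro kv hkv
        by_cases h : kv.1 = t <;>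
          by_cases hc : kv.1 ∈ rest <;> simp [List.contains_cons, h, hc]
      rw [hstep, ih (b + p.2) _ hnd', key, hflt]

-- Python set membership on the deduplicated list is list membership
lemma pvSetContains (xs : List String) (x : String) :
    PySem.Set.contains (PySem.Set.ofList xs) x = xs.contains x := by
  by_cases h : x ∈ xs <;> simp [PySem.Set.contains, PySem.Set.mem_ofList, h]

-- after the fold, the urgent key is still in the dict iff it never occurred
set_option maxHeartbeats 1000000 in
lemma pvContainsFiltered (ts : List String) :
    (PySem.Dict.mk (pvInit.items.filter (fun kv => !ts.contains kv.1))).contains "urgent_trigger_event"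
      = !ts.contains "urgent_trigger_event" := by
  by_cases h : "urgent_trigger_event" ∈ ts <;>
    simp [pvInit, PySem.Dict.contains, List.filter_cons, h] <;>
    split_ifs <;> simp <;> (intro a b hab heq; subst heq; simp at hab)

-- ===== VERDICT (by name: the statement is the Claim_ definition above) =====
set_option maxHeartbeats 2000000 in
theorem high_intent_score_boost_spec : Claim_equal_high_intent_score_boost := by
  intro hs ds _
  unfold Spec_high_intent_score_boost high_intent_score_boost high_intent_score_boost_alt
  have hfold : hs.foldl (fun st sig => pvConsume st (pvTypeOf sig)) ((0 : Int), pvInit)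
      = (hs.map pvTypeOf).foldl pvConsume ((0 : Int), pvInit) := by
    rw [List.foldl_map]
  have hnd : ((pvInit.items).map Prod.fst).Nodup := by decide
  have hany : ds.any (fun sig => pvTypeOf sig == "high_priority_need")
      = (ds.map pvTypeOf).contains "high_priority_need" := by
    rw [← List.any_beq', List.any_map]
    rfl
  rw [hfold, show pvInit = PySem.Dict.mk pvInit.items from rfl,
     pvConsumeFold (hs.map pvTypeOf) 0 pvInit.items hnd]
  rw [show (fun sig : List (String × String) => PySem.Dict.getD (PySem.Dict.mk sig) "type" "") = pvTypeOf from rfl]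
  simp only [pvSetContains, hany]
  rw [pvContainsFiltered]
  simp only [pvInit, List.map_cons, List.map_nil, List.sum_cons, List.sum_nil]
  set c1 := (hs.map pvTypeOf).contains "urgent_trigger_event" with hc1
  set c2 := (hs.map pvTypeOf).contains "operational_pain" with hc2
  set c3 := (hs.map pvTypeOf).contains "decision_maker_intent" with hc3
  set c4 := (hs.map pvTypeOf).contains "competitor_engagement" with hc4
  set c5 := (hs.map pvTypeOf).contains "problem_discovery_signal" with hc5
  set c6 := (hs.map pvTypeOf).contains "downstream_growth" with hc6
  set d1 := (ds.map pvTypeOf).contains "high_priority_need" with hd1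
  cases c1 <;> cases c2 <;> cases c3 <;> cases c4 <;> cases c5 <;> cases c6 <;> cases d1 <;>
    simp
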